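-- pv_equiv track=rewrite | github.com/instantcoffeeninja/Home-monitor | src/home_monitor/core.py | render_device_summary_bar
-- ===== SOURCE A (Python) =====
-- def render_device_summary_bar(rows: list[tuple[str, str, str, str, str, str]]) -> str:
--     """Build summary counts for total and each status bucket."""
--     total_devices = len(rows)
--     online_devices = sum(
--         1 for _ip, _hn, _ls, status, _mac, _vendor in rows if status == "status-online"
--     )
--     idle_devices = sum(
--         1 for _ip, _hn, _ls, status, _mac, _vendor in rows if status == "status-idle"
--     )
--     offline_devices = sum(
--         1 for _ip, _hn, _ls, status, _mac, _vendor in rows if status == "status-offline"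
--     )
--
--     return (
--         '<section class="summary-bar" aria-label="Device summary">'
--         f"<span><strong>Total:</strong> {total_devices}</span>"
--         f"<span><strong>Online:</strong> {online_devices}</span>"
--         f"<span><strong>Idle:</strong> {idle_devices}</span>"
--         f"<span><strong>Offline:</strong> {offline_devices}</span>"
--         "</section>"
--     )
-- ===== SOURCE B (Python) =====
-- def render_device_summary_bar(rows: list[tuple[str, str, str, str, str, str]]) -> str:
--     """Build summary counts for total and each status bucket."""
--     online_devices = idle_devices = offline_devices = 0
--     for _ip, _hn, _ls, status, _mac, _vendor in rows:
--         if status == "status-online":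
--             online_devices += 1
--         elif status == "status-idle":
--             idle_devices += 1
--         elif status == "status-offline":
--             offline_devices += 1
--     return (
--         '<section class="summary-bar" aria-label="Device summary">'
--         f"<span><strong>Total:</strong> {len(rows)}</span>"
--         f"<span><strong>Online:</strong> {online_devices}</span>"
--         f"<span><strong>Idle:</strong> {idle_devices}</span>"
--         f"<span><strong>Offline:</strong> {offline_devices}</span>"
--         "</section>"
--     )
-- ===== Notes on version B (the rewrite author's own statement) =====
-- stated objective: alternative
-- what changed: Replaces A's three independent filtering scans over rows with one single-pass loop threading an (online, idle, offline) triple accumulator through an if/elif dispatch on the status field.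
import Mathlib
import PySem

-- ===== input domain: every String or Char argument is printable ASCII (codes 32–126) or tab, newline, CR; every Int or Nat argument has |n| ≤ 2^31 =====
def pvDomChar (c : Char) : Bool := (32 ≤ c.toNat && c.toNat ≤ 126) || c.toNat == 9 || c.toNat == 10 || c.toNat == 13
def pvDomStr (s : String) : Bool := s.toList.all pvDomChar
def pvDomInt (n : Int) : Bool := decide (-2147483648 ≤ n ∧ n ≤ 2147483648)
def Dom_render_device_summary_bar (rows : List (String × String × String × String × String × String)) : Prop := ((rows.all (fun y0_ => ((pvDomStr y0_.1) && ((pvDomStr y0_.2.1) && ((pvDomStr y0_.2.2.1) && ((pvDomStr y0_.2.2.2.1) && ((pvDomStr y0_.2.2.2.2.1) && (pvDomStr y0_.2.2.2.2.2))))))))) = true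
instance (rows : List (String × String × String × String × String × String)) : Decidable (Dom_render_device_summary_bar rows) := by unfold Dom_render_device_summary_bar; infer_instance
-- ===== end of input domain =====

-- ===== PORT A =====
-- B replaces A's three filtering scans by a single-pass loop threading an (online, idle, offline) triple accumulator; objective: alternative decomposition.
def render_device_summary_bar (rows : List (String × String × String × String × String × String)) : String :=
  let total_devices : Int := (rows.length : Int)
  let online_devices : Int := rows.foldl (fun acc r => if r.2.2.2.1 = "status-online" then acc + 1 else acc) 0
  let idle_devices : Int := rows.foldl (fun acc r => if r.2.2.2.1 = "status-idle" then acc + 1 else acc) 0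
  let offline_devices : Int := rows.foldl (fun acc r => if r.2.2.2.1 = "status-offline" then acc + 1 else acc) 0
  "<section class=\"summary-bar\" aria-label=\"Device summary\">" ++
    "<span><strong>Total:</strong> " ++ PySem.Int.toStr total_devices ++ "</span>" ++
    "<span><strong>Online:</strong> " ++ PySem.Int.toStr online_devices ++ "</span>" ++
    "<span><strong>Idle:</strong> " ++ PySem.Int.toStr idle_devices ++ "</span>" ++
    "<span><strong>Offline:</strong> " ++ PySem.Int.toStr offline_devices ++ "</span>" ++
    "</section>"

-- ===== PORT B =====
-- single pass: one foldl threading the (online, idle, offline) triple, if/elif dispatch (Source B's loop)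
def pvStep (t : Int × Int × Int) (r : String × String × String × String × String × String) : Int × Int × Int :=
  if r.2.2.2.1 = "status-online" then (t.1 + 1, t.2.1, t.2.2)
  else if r.2.2.2.1 = "status-idle" then (t.1, t.2.1 + 1, t.2.2)
  else if r.2.2.2.1 = "status-offline" then (t.1, t.2.1, t.2.2 + 1)
  else t

def render_device_summary_bar_alt (rows : List (String × String × String × String × String × String)) : String :=
  let t := rows.foldl pvStep (0, 0, 0)
  "<section class=\"summary-bar\" aria-label=\"Device summary\">" ++
    "<span><strong>Total:</strong> " ++ PySem.Int.toStr (rows.length : Int) ++ "</span>" ++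
    "<span><strong>Online:</strong> " ++ PySem.Int.toStr t.1 ++ "</span>" ++
    "<span><strong>Idle:</strong> " ++ PySem.Int.toStr t.2.1 ++ "</span>" ++
    "<span><strong>Offline:</strong> " ++ PySem.Int.toStr t.2.2 ++ "</span>" ++
    "</section>"

-- ===== PRECONDITION & SPEC =====
def Spec_render_device_summary_bar (rows : List (String × String × String × String × String × String)) (out : String) : Prop := out = render_device_summary_bar_alt rows
instance (rows : List (String × String × String × String × String × String)) (out : String) : Decidable (Spec_render_device_summary_bar rows out) := by unfold Spec_render_device_summary_bar; infer_instance

-- ===== CLAIM =====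
def Claim_equal_render_device_summary_bar : Prop := ∀ (rows : List (String × String × String × String × String × String)), Dom_render_device_summary_bar rows → Spec_render_device_summary_bar rows (render_device_summary_bar rows)

-- ===== LEMMAS AND PROOFS =====
lemma foldl_count_status (s : String) (rows : List (String × String × String × String × String × String)) (a : Int) :
    rows.foldl (fun acc r => if r.2.2.2.1 = s then acc + 1 else acc) a
      = a + ((rows.map (fun r => r.2.2.2.1)).count s : Int) := by
  induction rows generalizing a with
  | nil => simp
  | cons h t ih =>
      simp only [List.foldl_cons, List.map_cons, List.count_cons, ih]
      by_cases hs : h.2.2.2.1 = s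
      · simp [hs]; ring
      · simp [hs]

lemma foldl_pvStep_eq_counts (rows : List (String × String × String × String × String × String)) (a : Int × Int × Int) :
    rows.foldl pvStep a = (a.1 + ((rows.map (fun r => r.2.2.2.1)).count "status-online" : Int),
                           a.2.1 + ((rows.map (fun r => r.2.2.2.1)).count "status-idle" : Int),
                           a.2.2 + ((rows.map (fun r => r.2.2.2.1)).count "status-offline" : Int)) := by
  induction rows generalizing a with
  | nil => simp
  | cons h t ih =>
      simp only [List.foldl_cons, List.map_cons, List.count_cons, ih, pvStep]
      by_cases h1 : h.2.2.2.1 = "status-online"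
      · simp [h1]; ring
      · by_cases h2 : h.2.2.2.1 = "status-idle"
        · simp [h1, h2]; ring
        · by_cases h3 : h.2.2.2.1 = "status-offline"
          · simp [h1, h2, h3]; ring
          · simp [h1, h2, h3]

-- ===== VERDICT =====
theorem render_device_summary_bar_spec : Claim_equal_render_device_summary_bar := by
  intro rows _
  unfold Spec_render_device_summary_bar render_device_summary_bar render_device_summary_bar_alt
  simp only [foldl_count_status, foldl_pvStep_eq_counts, Int.zero_add]
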